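-- pv_equiv track=rewrite | github.com/ch1nhpd/strix | strix/tools/assessment/assessment_orchestration_actions.py | _skills_csv
-- ===== SOURCE A (Python) =====
-- def _skills_csv(values: list[str]) -> str | None:
--     normalized: list[str] = []
--     for value in values:
--         candidate = str(value).strip()
--         if candidate and candidate not in normalized:
--             normalized.append(candidate)
--         if len(normalized) >= 5:
--             break
--     return ",".join(normalized) if normalized else None
-- ===== SOURCE B (Python) =====
-- def _skills_csv(values: list[str]) -> str | None:
--     stripped = [str(v).strip() for v in values]
--     uniq = {c for c in stripped if c}
--     top = sorted(uniq, key=stripped.index)[:5]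
--     return ",".join(top) if top else None
-- ===== Notes on version B (the rewrite author's own statement) =====
-- stated objective: alternative
-- what changed: Replaces A's streaming membership-check loop with early break by an unordered set of cleaned values whose first-occurrence order is recovered afterwards by sorting on stripped.index, then sliced to 5.
import Mathlib
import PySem

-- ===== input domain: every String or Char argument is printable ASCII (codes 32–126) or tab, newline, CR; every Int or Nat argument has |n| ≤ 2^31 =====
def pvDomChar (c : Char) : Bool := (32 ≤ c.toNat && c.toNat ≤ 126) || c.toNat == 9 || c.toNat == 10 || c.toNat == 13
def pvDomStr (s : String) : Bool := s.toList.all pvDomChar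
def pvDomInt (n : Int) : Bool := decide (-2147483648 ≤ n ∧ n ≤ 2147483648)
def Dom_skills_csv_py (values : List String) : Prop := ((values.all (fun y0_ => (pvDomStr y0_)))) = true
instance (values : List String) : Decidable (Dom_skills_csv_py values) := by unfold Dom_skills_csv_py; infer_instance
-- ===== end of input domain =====

-- B collects the cleaned values in an unordered set and recovers first-occurrence order by
-- sorting on stripped.index, then slices to 5 — instead of A's streaming membership-check
-- loop with an early break (alternative algorithm, similar cost).

-- ===== PORT A =====
-- the for-loop of A: accumulator `normalized`, early break once 5 entries are collected
def skillsLoop (values : List String) (normalized : List String) : List String :=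
  match values with
  | [] => normalized
  | value :: rest =>
    let candidate := PySem.Str.strip value
    let normalized' :=
      if candidate ≠ "" ∧ candidate ∉ normalized then normalized ++ [candidate] else normalized
    if 5 ≤ normalized'.length then normalized' else skillsLoop rest normalized'

def skills_csv_py (values : List String) : Option String :=
  let normalized := skillsLoop values []
  if normalized ≠ [] then some (PySem.Str.join "," normalized) else none

-- ===== PORT B =====
def skills_csv_py_alt (values : List String) : Option String :=
  let stripped := values.map PySem.Str.strip
  let uniq := PySem.Set.ofList (stripped.filter (fun c => c ≠ ""))   -- {c for c in stripped if c}
  -- stripped.index(c): total form of index?; every c sorted here is in stripped, so it never raises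
  let top := PySem.List.slice
    (PySem.List.sorted uniq (fun c => (PySem.List.index? stripped c).getD 0)) none (some 5)
  if top ≠ [] then some (PySem.Str.join "," top) else none

-- ===== PRECONDITION & SPEC =====
def Spec_skills_csv_py (values : List String) (out : Option String) : Prop := out = skills_csv_py_alt values
instance (values : List String) (out : Option String) : Decidable (Spec_skills_csv_py values out) := by unfold Spec_skills_csv_py; infer_instance

-- ===== CLAIM =====
def Claim_equal_skills_csv_py : Prop := ∀ (values : List String), Dom_skills_csv_py values → Spec_skills_csv_py values (skills_csv_py values)

-- ===== LEMMAS AND PROOFS =====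

-- foldl over Set.add only ever appends to its accumulator
theorem foldl_add_prefix {α : Type} [BEq α] (ys : List α) (s : PySem.Set α) :
    ∃ t, List.foldl PySem.Set.add s ys = s ++ t := by
  induction ys generalizing s with
  | nil => exact ⟨[], by simp⟩
  | cons y ys ih =>
    simp only [List.foldl_cons, PySem.Set.add]
    split_ifs with h
    · exact ih s
    · obtain ⟨t, ht⟩ := ih (s ++ [y])
      exact ⟨y :: t, by simpa using ht⟩

-- loop invariant: A's loop computes the first 5 of the order-preserving dedup
theorem skillsLoop_eq (values : List String) (acc : List String)
    (hnd : acc.Nodup) (hlen : acc.length < 5) :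
    skillsLoop values acc =
      (List.foldl PySem.Set.add acc ((values.map PySem.Str.strip).filter (fun c => c ≠ ""))).take 5 := by
  induction values generalizing acc with
  | nil =>
    simp [skillsLoop, List.take_of_length_le (Nat.le_of_lt hlen)]
  | cons v rest ih =>
    simp only [skillsLoop, List.map_cons, List.filter_cons]
    by_cases hc : PySem.Str.strip v = ""
    · have e1 : (if PySem.Str.strip v ≠ "" ∧ PySem.Str.strip v ∉ acc
          then acc ++ [PySem.Str.strip v] else acc) = acc := if_neg (fun h => h.1 hc)
      rw [e1, if_neg (show ¬ 5 ≤ acc.length by omega), ih acc hnd hlen]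
      simp [hc]
    · have hcd : decide (PySem.Str.strip v ≠ "") = true := by simpa using hc
      by_cases hm : PySem.Str.strip v ∈ acc
      · have e1 : (if PySem.Str.strip v ≠ "" ∧ PySem.Str.strip v ∉ acc
            then acc ++ [PySem.Str.strip v] else acc) = acc := if_neg (fun h => h.2 hm)
        have hadd : PySem.Set.add acc (PySem.Str.strip v) = acc := by
          simp [PySem.Set.add, hm]
        rw [e1, if_neg (show ¬ 5 ≤ acc.length by omega), ih acc hnd hlen,
            if_pos hcd, List.foldl_cons, hadd]
      · have e1 : (if PySem.Str.strip v ≠ "" ∧ PySem.Str.strip v ∉ acc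
            then acc ++ [PySem.Str.strip v] else acc) = acc ++ [PySem.Str.strip v] :=
          if_pos ⟨hc, hm⟩
        have hadd : PySem.Set.add acc (PySem.Str.strip v) = acc ++ [PySem.Str.strip v] := by
          simp [PySem.Set.add, hm]
        rw [e1]
        by_cases hfull : 5 ≤ (acc ++ [PySem.Str.strip v]).length
        · rw [if_pos hfull]
          obtain ⟨t, ht⟩ := foldl_add_prefix
            (List.filter (fun c => decide (c ≠ "")) (List.map PySem.Str.strip rest))
            (acc ++ [PySem.Str.strip v])
          have hlen5 : (acc ++ [PySem.Str.strip v]).length = 5 := by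
            simp at hfull ⊢; omega
          rw [if_pos hcd, List.foldl_cons, hadd, ht, ← hlen5, List.take_left]
        · have hnd' : (acc ++ [PySem.Str.strip v]).Nodup := by
            simp [List.nodup_append, hnd]
            exact fun a ha h => hm (h ▸ ha)
          rw [if_neg hfull, ih _ hnd' (by simp at hfull ⊢; omega),
              if_pos hcd, List.foldl_cons, hadd]

-- any element of a list is ≠ x when x lies outside and the element inside a reference list: inline below

-- foldl Set.add over an accumulator: the accumulator stays, then what of dedup is not yet in it
theorem foldl_add_acc {α : Type} [BEq α] [LawfulBEq α] (l : List α) (acc : List α) :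
    List.foldl PySem.Set.add acc l
      = acc ++ (List.foldl PySem.Set.add [] l).filter (fun y => !acc.contains y) := by
  induction l generalizing acc with
  | nil => simp
  | cons x l ih =>
    simp only [List.foldl_cons]
    have hnil : PySem.Set.add ([] : List α) x = [x] := by simp [PySem.Set.add]
    rw [hnil, ih [x]]
    by_cases hx : x ∈ acc
    · have ha : PySem.Set.add acc x = acc := by simp [PySem.Set.add, hx]
      rw [ha, ih acc]
      have hcx : (!acc.contains x) = false := by simp [hx]
      simp only [List.filter_append, List.filter_cons, hcx, Bool.false_eq_true, reduceIte,
        List.filter_filter, List.filter_nil, List.nil_append]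
      congr 1
      apply List.filter_congr
      intro y _
      by_cases hy : y ∈ acc
      · simp [hy]
      · have hyx : ¬ y = x := fun h => hy (h ▸ hx)
        simp [hy, hyx]
    · have ha : PySem.Set.add acc x = acc ++ [x] := by simp [PySem.Set.add, hx]
      rw [ha, ih (acc ++ [x])]
      have hcx : (!acc.contains x) = true := by simp [hx]
      simp only [List.filter_cons, hcx, reduceIte, List.filter_filter,
        List.append_assoc, List.cons_append, List.nil_append]
      congr 2
      apply List.filter_congr
      intro y _
      by_cases hxy : y = x
      · subst hxy; simp
      · by_cases hy : y ∈ acc <;> simp [hy, hxy]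

-- dedup of a cons: head first, then the tail's dedup with the head removed
theorem dedup_cons {α : Type} [BEq α] [LawfulBEq α] (x : α) (l : List α) :
    PySem.List.dedup (x :: l) = x :: (PySem.List.dedup l).filter (fun y => !(y == x)) := by
  simp only [PySem.List.dedup, PySem.Set.ofList, PySem.Set.empty, List.foldl_cons]
  have hnil : PySem.Set.add ([] : List α) x = [x] := by simp [PySem.Set.add]
  rw [hnil, foldl_add_acc l [x]]
  simp

-- dedup commutes with filter
theorem dedup_filter {α : Type} [BEq α] [LawfulBEq α] (l : List α) (p : α → Bool) :
    PySem.List.dedup (l.filter p) = (PySem.List.dedup l).filter p := by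
  induction l with
  | nil => simp [PySem.List.dedup, PySem.Set.ofList, PySem.Set.empty]
  | cons x t ih =>
    simp only [List.filter_cons]
    by_cases hp : p x
    · rw [if_pos hp, dedup_cons, dedup_cons, ih]
      simp only [List.filter_cons, hp, reduceIte, List.filter_filter]
      congr 1
      apply List.filter_congr
      intro y _
      exact Bool.and_comm _ _
    · rw [if_neg hp, dedup_cons, ih]
      simp only [List.filter_cons]
      have hpx : p x = false := by simpa using hp
      simp only [hpx, Bool.false_eq_true, reduceIte, List.filter_filter]
      apply List.filter_congr
      intro y _
      by_cases hxy : y = x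
      · subst hxy; simp [hpx]
      · simp [hxy]

-- elements of dedup l occur in strictly increasing first-occurrence order
theorem dedup_pairwise_idxOf {α : Type} [BEq α] [LawfulBEq α] (l : List α) :
    (PySem.List.dedup l).Pairwise (fun a b => l.idxOf a < l.idxOf b) := by
  induction l with
  | nil => simp [PySem.List.dedup, PySem.Set.ofList, PySem.Set.empty]
  | cons x t ih =>
    rw [dedup_cons]
    constructor
    · intro b hb
      have hbne : ¬ b = x := by simpa using (List.mem_filter.mp hb).2
      have hbx' : (x == b) = false := by simpa using (Ne.symm hbne)
      simp [List.idxOf_cons, hbx']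
    · have h1 : ((PySem.List.dedup t).filter (fun y => !(y == x))).Pairwise
          (fun a b => t.idxOf a < t.idxOf b) :=
        List.Pairwise.sublist List.filter_sublist ih
      apply h1.imp_of_mem
      intro a b ha hb hlt
      have hane : ¬ a = x := by simpa using (List.mem_filter.mp ha).2
      have hbne : ¬ b = x := by simpa using (List.mem_filter.mp hb).2
      have hax : (x == a) = false := by simpa using (Ne.symm hane)
      have hbx : (x == b) = false := by simpa using (Ne.symm hbne)
      simp only [List.idxOf_cons, hax, hbx, cond_false]
      omega

-- stripped.index for a member: the total form returns the first index
theorem index?_getD_mem {α : Type} [BEq α] [LawfulBEq α] (xs : List α) (v : α) (h : v ∈ xs) :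
    PySem.List.index? xs v = some (xs.idxOf v) := by
  rw [PySem.List.index?_eq_idxOf?]
  induction xs with
  | nil => simp at h
  | cons x t ih =>
    by_cases hx : x = v
    · subst hx; simp [List.idxOf?_cons]
    · have hxv : (x == v) = false := by simpa using hx
      have hvt : v ∈ t := by
        rcases List.mem_cons.mp h with h' | h'
        · exact absurd h'.symm hx
        · exact h'
      simp [List.idxOf?_cons, List.idxOf_cons, hxv, ih hvt]

-- sorting the set by first-occurrence index is exactly the order-preserving dedup
theorem sorted_uniq_eq (values : List String) :
    PySem.List.sorted
        (PySem.Set.ofList ((values.map PySem.Str.strip).filter (fun c => c ≠ "")))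
        (fun c => (PySem.List.index? (values.map PySem.Str.strip) c).getD 0) false
      = PySem.List.dedup ((values.map PySem.Str.strip).filter (fun c => c ≠ "")) := by
  apply PySem.List.sorted_eq_of_perm_of_pairwise_lt
  · exact List.Perm.refl _
  · have h5 := dedup_pairwise_idxOf (values.map PySem.Str.strip)
    have h6 : ((PySem.List.dedup (values.map PySem.Str.strip)).filter
          (fun c => decide (c ≠ ""))).Pairwise
        (fun a b => (values.map PySem.Str.strip).idxOf a < (values.map PySem.Str.strip).idxOf b) :=
      List.Pairwise.sublist List.filter_sublist h5
    rw [← dedup_filter] at h6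
    have hd : PySem.List.dedup ((values.map PySem.Str.strip).filter (fun c => decide (c ≠ "")))
        = PySem.Set.ofList ((values.map PySem.Str.strip).filter (fun c => decide (c ≠ ""))) := by
      simp [PySem.List.dedup]
    rw [hd] at h6
    apply h6.imp_of_mem
    intro a b ha hb hlt
    have hma : a ∈ values.map PySem.Str.strip :=
      (List.mem_filter.mp ((PySem.Set.mem_ofList _ _).mp ha)).1
    have hmb : b ∈ values.map PySem.Str.strip :=
      (List.mem_filter.mp ((PySem.Set.mem_ofList _ _).mp hb)).1
    rw [index?_getD_mem _ _ hma, index?_getD_mem _ _ hmb]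
    simpa using hlt

-- ===== VERDICT =====
theorem skills_csv_py_spec : Claim_equal_skills_csv_py := by
  intro values _
  unfold Spec_skills_csv_py
  simp only [skills_csv_py, skills_csv_py_alt]
  rw [PySem.List.slice_to _ (by norm_num : (0:Int) ≤ 5), sorted_uniq_eq values,
      skillsLoop_eq values [] List.nodup_nil (by simp)]
  rfl
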